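-- pv_equiv track=rewrite | github.com/PedroRuanoS/FP-22-23 | LABs/aulaspraticas.py | texto
-- ===== SOURCE A (Python) =====
-- def texto(text, letter):
--     res1 = ''
--     res2 = ''
--     for i in text:
--         if i not in letter:
--             res1 += i
--         else:
--             res2 += i
--     return res2 + res1
-- ===== SOURCE B (Python) =====
-- def texto(text, letter):
--     return ''.join(sorted(text, key=lambda c: c not in letter))
-- ===== Notes on version B (the rewrite author's own statement) =====
-- stated objective: simpler
-- what changed: Replaces A's explicit two-accumulator partitioning loop with a one-line stable sort by boolean membership key (members first), relying on sort stability to preserve each group's original order.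
import Mathlib
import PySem

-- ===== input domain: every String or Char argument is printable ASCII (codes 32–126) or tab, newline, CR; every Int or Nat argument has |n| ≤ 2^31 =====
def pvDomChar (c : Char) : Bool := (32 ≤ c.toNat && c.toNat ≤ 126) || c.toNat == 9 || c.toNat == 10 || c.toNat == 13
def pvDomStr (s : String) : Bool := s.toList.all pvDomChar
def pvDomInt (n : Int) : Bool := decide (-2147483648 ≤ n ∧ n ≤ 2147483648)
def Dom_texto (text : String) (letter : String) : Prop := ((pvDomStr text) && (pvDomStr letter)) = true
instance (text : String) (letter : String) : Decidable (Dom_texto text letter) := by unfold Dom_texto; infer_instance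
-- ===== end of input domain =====

-- B replaces A's explicit two-accumulator partitioning loop with a single stable
-- sort of the characters by boolean membership key (members of `letter` first): simpler, not faster.


-- ===== PORT A =====
-- literal port: iterate over the characters, accumulating res1 (chars not in letter)
-- and res2 (chars in letter); return res2 + res1. (i in letter) for a single char i is char membership.
def texto (text : String) (letter : String) : String :=
  let r := text.toList.foldl
    (fun (p : List Char × List Char) i =>
      if i ∉ letter.toList then (p.1 ++ [i], p.2) else (p.1, p.2 ++ [i]))
    ([], [])
  String.mk (r.2 ++ r.1)

-- ===== PORT B =====
-- port of Source B: ''.join(sorted(text, key=lambda c: c not in letter)).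
-- The Python bool key (False < True) is ported as Int 0/1: c in letter ↦ 0, else 1.
def texto_alt (text : String) (letter : String) : String :=
  String.mk (PySem.List.sorted text.toList
    (fun c => if c ∈ letter.toList then (0 : Int) else 1) false)

-- ===== PRECONDITION & SPEC =====
def Spec_texto (text : String) (letter : String) (out : String) : Prop := out = texto_alt text letter
instance (text : String) (letter : String) (out : String) : Decidable (Spec_texto text letter out) := by unfold Spec_texto; infer_instance

-- ===== CLAIM (what is proved, stated in full; the proofs are below) =====
def Claim_equal_texto : Prop := ∀ (text : String) (letter : String), Dom_texto text letter → Spec_texto text letter (texto text letter)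

-- ===== LEMMAS AND PROOFS =====

-- the 0/1 membership key
def pvKey (L : List Char) (c : Char) : Int := if c ∈ L then 0 else 1

-- A's loop computes the two membership filters, appended to the accumulators.
theorem texto_loopA (L : List Char) (xs : List Char) : ∀ (r1 r2 : List Char),
    xs.foldl
      (fun (p : List Char × List Char) i =>
        if i ∉ L then (p.1 ++ [i], p.2) else (p.1, p.2 ++ [i]))
      (r1, r2)
    = (r1 ++ xs.filter (fun c => decide (c ∉ L)),
       r2 ++ xs.filter (fun c => decide (c ∈ L))) := by
  induction xs with
  | nil => intro r1 r2; simp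
  | cons x xs ih =>
    intro r1 r2
    rw [List.foldl_cons]
    by_cases hx : x ∈ L
    · rw [if_neg (not_not_intro hx), ih]
      simp [hx, List.append_assoc]
    · rw [if_pos hx, ih]
      simp [hx, List.append_assoc]

-- inserting a key-1 element at the end
theorem texto_ins1 (L : List Char) (x : Char) (hx : x ∉ L) (acc : List Char) :
    PySem.List.insertBy (fun a b => decide (pvKey L a < pvKey L b)) x acc = acc ++ [x] := by
  induction acc with
  | nil => simp [PySem.List.insertBy]
  | cons y ys ih =>
    have : ¬ (pvKey L x < pvKey L y) := by
      simp only [pvKey, if_neg hx]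
      by_cases hy : y ∈ L <;> simp [hy]
    simp [PySem.List.insertBy, this, ih]

-- inserting a key-0 element between the key-0 block and the key-1 block
theorem texto_ins0 (L : List Char) (x : Char) (hx : x ∈ L) (f0 f1 : List Char)
    (h0 : ∀ c ∈ f0, c ∈ L) (h1 : ∀ c ∈ f1, c ∉ L) :
    PySem.List.insertBy (fun a b => decide (pvKey L a < pvKey L b)) x (f0 ++ f1)
      = f0 ++ x :: f1 := by
  induction f0 with
  | nil =>
    cases f1 with
    | nil => simp [PySem.List.insertBy]
    | cons y ys =>
      have hy : y ∉ L := h1 y (by simp)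
      have : pvKey L x < pvKey L y := by simp [pvKey, hx, hy]
      simp [PySem.List.insertBy, this]
  | cons z zs ih =>
    have hz : z ∈ L := h0 z (by simp)
    have : ¬ (pvKey L x < pvKey L z) := by simp [pvKey, hx, hz]
    simpa [PySem.List.insertBy, this] using ih (fun c hc => h0 c (by simp [hc]))

-- the insertion-sort loop maintains "key-0 block ++ key-1 block", each in input order
theorem texto_sortInv (L : List Char) (xs : List Char) : ∀ (f0 f1 : List Char),
    (∀ c ∈ f0, c ∈ L) → (∀ c ∈ f1, c ∉ L) →
    xs.foldl
      (fun acc x => PySem.List.insertBy (fun a b => decide (pvKey L a < pvKey L b)) x acc)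
      (f0 ++ f1)
    = (f0 ++ xs.filter (fun c => decide (c ∈ L))) ++ (f1 ++ xs.filter (fun c => decide (c ∉ L))) := by
  induction xs with
  | nil => intro f0 f1 _ _; simp
  | cons x xs ih =>
    intro f0 f1 h0 h1
    by_cases hx : x ∈ L
    · rw [List.foldl_cons, texto_ins0 L x hx f0 f1 h0 h1]
      have := ih (f0 ++ [x]) f1
        (by intro c hc; rcases List.mem_append.1 hc with h | h
            · exact h0 c h
            · simp at h; subst h; exact hx) h1
      simpa [List.append_assoc, hx] using this
    · rw [List.foldl_cons, ← List.append_assoc, texto_ins1 L x hx (f0 ++ f1),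
          List.append_assoc]
      have := ih f0 (f1 ++ [x]) h0
        (by intro c hc; rcases List.mem_append.1 hc with h | h
            · exact h1 c h
            · simp at h; subst h; exact hx)
      simpa [List.append_assoc, hx] using this

-- ===== VERDICT (by name: the statement is the Claim_ definition above) =====
theorem texto_spec : Claim_equal_texto := by
  intro text letter _
  unfold Spec_texto texto texto_alt
  rw [texto_loopA letter.toList text.toList [] []]
  rw [show (fun c => if c ∈ letter.toList then (0 : Int) else 1) = pvKey letter.toList from rfl,
      PySem.List.sorted_eq_foldl_insertBy]
  have h := texto_sortInv letter.toList text.toList [] [] (by simp) (by simp)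
  simp only [List.nil_append] at h
  rw [h]
  simp
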